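-- pv_equiv track=rewrite | github.com/vagisha-nidhi/TextSummarizer | askHuman.py | automaticGenerator
-- ===== SOURCE A (Python) =====
-- def automaticGenerator(indeces_extracted,text_len) :
-- 	autoYesOrNo = []
-- 	for x in range(text_len):
-- 		if x in indeces_extracted:
-- 			autoYesOrNo.append(1)
-- 		else :
-- 			autoYesOrNo.append(0)
--
-- 	return autoYesOrNo
-- ===== SOURCE B (Python) =====
-- def automaticGenerator(indeces_extracted, text_len):
--     autoYesOrNo = [0] * text_len
--     for idx in indeces_extracted:
--         if 0 <= idx < text_len:
--             autoYesOrNo[idx] = 1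
--     return autoYesOrNo
-- ===== Notes on version B (the rewrite author's own statement) =====
-- stated objective: faster
-- what changed: Instead of scanning every position 0..text_len-1 and testing membership in indeces_extracted (O(n*m)), B allocates a zero list and scatter-writes 1 at each in-range extracted index (O(n+m)).
import Mathlib
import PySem

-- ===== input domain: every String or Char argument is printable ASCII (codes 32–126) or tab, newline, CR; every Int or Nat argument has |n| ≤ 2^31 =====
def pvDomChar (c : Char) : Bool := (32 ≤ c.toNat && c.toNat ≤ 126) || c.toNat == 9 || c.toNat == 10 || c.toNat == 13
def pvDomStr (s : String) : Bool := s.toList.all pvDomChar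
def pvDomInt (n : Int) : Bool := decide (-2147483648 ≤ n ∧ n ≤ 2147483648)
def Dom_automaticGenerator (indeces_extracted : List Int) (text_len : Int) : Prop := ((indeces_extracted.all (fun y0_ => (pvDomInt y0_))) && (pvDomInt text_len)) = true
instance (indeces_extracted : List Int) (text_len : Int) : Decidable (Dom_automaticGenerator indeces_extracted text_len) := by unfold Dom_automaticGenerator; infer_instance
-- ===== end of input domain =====

-- B replaces A's scan of all positions with membership tests by a zero list plus
-- scatter-writes at the in-range extracted indices (objective: faster).

-- ===== PORT A =====
-- for x in range(text_len): append 1 if x in indeces_extracted else 0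
def automaticGenerator (indeces_extracted : List Int) (text_len : Int) : List Int :=
  (PySem.List.pyRange 0 text_len 1).foldl
    (fun autoYesOrNo x =>
      if x ∈ indeces_extracted then autoYesOrNo ++ [1] else autoYesOrNo ++ [0]) []

-- ===== PORT B =====
-- [0]*text_len, then set position idx to 1 for each in-range idx
def automaticGenerator_alt (indeces_extracted : List Int) (text_len : Int) : List Int :=
  indeces_extracted.foldl
    (fun autoYesOrNo idx =>
      if 0 ≤ idx ∧ idx < text_len then autoYesOrNo.set idx.toNat 1 else autoYesOrNo)
    (List.replicate text_len.toNat 0)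

-- ===== PRECONDITION & SPEC =====
def Spec_automaticGenerator (indeces_extracted : List Int) (text_len : Int) (out : List Int) : Prop := out = automaticGenerator_alt indeces_extracted text_len
instance (indeces_extracted : List Int) (text_len : Int) (out : List Int) : Decidable (Spec_automaticGenerator indeces_extracted text_len out) := by unfold Spec_automaticGenerator; infer_instance

-- ===== CLAIM (what is proved, stated in full; the proofs are below) =====
def Claim_equal_automaticGenerator : Prop := ∀ (indeces_extracted : List Int) (text_len : Int), Dom_automaticGenerator indeces_extracted text_len → Spec_automaticGenerator indeces_extracted text_len (automaticGenerator indeces_extracted text_len)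

-- ===== LEMMAS AND PROOFS =====

-- A's append-loop is acc ++ a 0/1 map over the range
theorem foldA_eq_map (ind : List Int) (xs : List Int) (acc : List Int) :
    xs.foldl (fun a x => if x ∈ ind then a ++ [1] else a ++ [0]) acc
      = acc ++ xs.map (fun x => if x ∈ ind then (1 : Int) else 0) := by
  induction xs generalizing acc with
  | nil => simp
  | cons x t ih =>
      simp only [List.foldl_cons, List.map_cons]
      by_cases h : x ∈ ind <;> simp [h, ih]

theorem foldB_length (ind : List Int) (n : Int) (acc : List Int) :
    (ind.foldl (fun a idx => if 0 ≤ idx ∧ idx < n then a.set idx.toNat 1 else a) acc).length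
      = acc.length := by
  induction ind generalizing acc with
  | nil => rfl
  | cons idx t ih =>
      simp only [List.foldl_cons]
      split_ifs with h <;> simp [ih]

-- after the scatter loop, position i holds 1 exactly when i occurs in ind
theorem foldB_getElem? (ind : List Int) (n : Int) (acc : List Int)
    (hlen : (acc.length : Int) ≤ n) (i : Nat) (hi : i < acc.length) :
    (ind.foldl (fun a idx => if 0 ≤ idx ∧ idx < n then a.set idx.toNat 1 else a) acc)[i]?
      = if (i : Int) ∈ ind then some 1 else acc[i]? := by
  induction ind generalizing acc with
  | nil => simp [List.getElem?_eq_getElem hi]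
  | cons idx t ih =>
      simp only [List.foldl_cons, List.mem_cons]
      by_cases hg : 0 ≤ idx ∧ idx < n
      · rw [if_pos hg, ih (acc.set idx.toNat 1) (by simpa using hlen) (by simpa using hi)]
        by_cases ht : (i : Int) ∈ t
        · simp [ht]
        · by_cases he : (i : Int) = idx
          · have h1 : idx.toNat = i := by omega
            simp [he, h1, hi]
          · have hne : idx.toNat ≠ i := by omega
            simp [ht, he, hne]
      · rw [if_neg hg, ih acc hlen hi]
        by_cases ht : (i : Int) ∈ t
        · simp [ht]
        · have he : (i : Int) ≠ idx := by omega
          simp [ht, he]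

-- ===== VERDICT (by name: the statement is the Claim_ definition above) =====
theorem automaticGenerator_spec : Claim_equal_automaticGenerator := by
  intro ind n _hDom
  show automaticGenerator ind n = automaticGenerator_alt ind n
  unfold automaticGenerator automaticGenerator_alt
  rw [foldA_eq_map, List.nil_append]
  apply List.ext_getElem?
  intro i
  by_cases hlen : i < n.toNat
  · rw [List.getElem?_eq_getElem (by simpa [PySem.List.length_pyRange_one] using hlen),
        foldB_getElem? ind n _ (by simp; omega) i (by simpa using hlen)]
    simp [PySem.List.getElem_pyRange_one, hlen, apply_ite]
  · rw [List.getElem?_eq_none (by simpa [PySem.List.length_pyRange_one] using hlen),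
        List.getElem?_eq_none (by rw [foldB_length]; simpa using hlen)]
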